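-- pv_equiv track=rewrite | github.com/MNINiro/Python | School appointment.py | allocate_appointment
-- ===== SOURCE A (Python) =====
-- def allocate_appointment(parent_name, parent_preferences, appointments):
--     # Try to allocate one of the preferred appointment times
--     for preference in parent_preferences:
--         for appointment in appointments:
--             if preference[0] == appointment[0] and preference[1] == appointment[1] and appointment[2] == '':
--                 appointment[2] = parent_name
--                 return True
--
--     # If preferred times are not available, allocate an alternative appointment
--     for appointment in appointments:
--         if appointment[2] == '':
--             appointment[2] = parent_name
--             return True
--
--     # If no appointment is available
--     return False
-- ===== SOURCE B (Python) =====
-- def allocate_appointment(parent_name, parent_preferences, appointments):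
--     # Rank each preferred (day, time) by its first position in the preference list.
--     rank = {}
--     for i, pref in enumerate(parent_preferences):
--         key = (pref[0], pref[1])
--         if key not in rank:
--             rank[key] = i
--     sentinel = len(parent_preferences)  # rank for an empty slot nobody asked for
--     best = None
--     best_rank = sentinel + 1
--     # One pass: among empty slots keep the one with the lowest preference rank,
--     # first-seen winning ties.
--     for appointment in appointments:
--         if appointment[2] == '':
--             r = rank.get((appointment[0], appointment[1]), sentinel)
--             if r < best_rank:
--                 best = appointment
--                 best_rank = r
--     if best is None:
--         return False
--     best[2] = parent_name
--     return True
-- ===== Notes on version B (the rewrite author's own statement) =====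
-- stated objective: alternative
-- what changed: Replaces A's preference-major nested scan plus a second fallback scan by one preference pass building a (day,time)->rank dict and a single appointment pass tracking the best-ranked empty slot (sentinel rank for non-preferred), assigning the winner after the pass; the dict removes the inner appointment scan.
-- outside the precondition, e.g. on allocate_appointment('p', [['d', 't'], ['x']], [['d', 't', '']]): A returns True, B raises IndexError; on allocate_appointment('p', [['x']], []): A returns False, B raises IndexError
import Mathlib
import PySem

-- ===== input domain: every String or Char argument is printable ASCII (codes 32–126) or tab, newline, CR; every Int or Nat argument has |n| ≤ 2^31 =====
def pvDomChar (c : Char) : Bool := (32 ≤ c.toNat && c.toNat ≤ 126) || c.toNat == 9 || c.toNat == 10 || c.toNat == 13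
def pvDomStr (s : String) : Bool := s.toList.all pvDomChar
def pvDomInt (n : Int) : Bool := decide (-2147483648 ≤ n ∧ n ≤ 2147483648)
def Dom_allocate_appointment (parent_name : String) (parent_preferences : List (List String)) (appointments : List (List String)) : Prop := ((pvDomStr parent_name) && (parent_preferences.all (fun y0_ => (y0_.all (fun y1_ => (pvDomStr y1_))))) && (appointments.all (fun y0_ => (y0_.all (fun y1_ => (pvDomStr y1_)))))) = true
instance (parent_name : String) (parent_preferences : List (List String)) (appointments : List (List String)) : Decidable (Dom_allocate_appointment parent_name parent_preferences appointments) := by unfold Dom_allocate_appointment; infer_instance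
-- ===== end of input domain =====

-- B replaces A's preference-major nested scan + fallback scan by one rank-dict pass over
-- preferences and a single best-so-far pass over appointments; same return value, and both
-- programs write parent_name into the same winning slot (the proof here is about the return value).


-- ===== PORT A =====
-- inner 'for appointment in appointments' of the preference loop (early return = true)
def pvA_inner (p : List String) : List (List String) → Bool
  | [] => false
  | a :: rest =>
      if p[0]? == a[0]? && p[1]? == a[1]? && a[2]? == some "" then true
      else pvA_inner p rest

-- outer 'for preference in parent_preferences'
def pvA_phase1 (appts : List (List String)) : List (List String) → Bool
  | [] => false
  | p :: rest => if pvA_inner p appts then true else pvA_phase1 appts rest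

-- fallback 'for appointment in appointments'
def pvA_phase2 : List (List String) → Bool
  | [] => false
  | a :: rest => if a[2]? == some "" then true else pvA_phase2 rest

def allocate_appointment (parent_name : String) (parent_preferences : List (List String)) (appointments : List (List String)) : Bool :=
  if pvA_phase1 appointments parent_preferences then true else pvA_phase2 appointments

-- ===== PORT B =====
-- 'for i, pref in enumerate(parent_preferences): ... if key not in rank: rank[key] = i'
def pvB_build : PySem.Dict (Option String × Option String) Nat → Nat → List (List String) → PySem.Dict (Option String × Option String) Nat
  | d, _, [] => d
  | d, i, p :: rest =>
      let key := (p[0]?, p[1]?)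
      pvB_build (if d.contains key then d else d.insert key i) (i + 1) rest

-- the single appointment pass maintaining (best, best_rank)
def pvB_loop (rank : PySem.Dict (Option String × Option String) Nat) (sentinel : Nat) :
    List (List String) → Option (List String) → Nat → Option (List String)
  | [], best, _ => best
  | a :: rest, best, bestRank =>
      if a[2]? == some "" then
        let r := rank.getD (a[0]?, a[1]?) sentinel
        if r < bestRank then pvB_loop rank sentinel rest (some a) r
        else pvB_loop rank sentinel rest best bestRank
      else pvB_loop rank sentinel rest best bestRank

def allocate_appointment_alt (parent_name : String) (parent_preferences : List (List String)) (appointments : List (List String)) : Bool :=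
  let rank := pvB_build PySem.Dict.empty 0 parent_preferences
  let sentinel := parent_preferences.length
  match pvB_loop rank sentinel appointments none (sentinel + 1) with
  | none => false
  | some _ => true

-- ===== PRECONDITION & SPEC =====
-- Pre_ excludes inputs where some preference has fewer than 2 fields or some appointment fewer
-- than 3: there Python raises IndexError (B always, A except when an early return or an empty
-- inner list lets it skip the short entry; B naturally raises on all of those, so they are excluded).
def Pre_allocate_appointment (parent_name : String) (parent_preferences : List (List String)) (appointments : List (List String)) : Prop :=
  (∀ p ∈ parent_preferences, 2 ≤ p.length) ∧ (∀ a ∈ appointments, 3 ≤ a.length)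
instance (parent_name : String) (parent_preferences : List (List String)) (appointments : List (List String)) : Decidable (Pre_allocate_appointment parent_name parent_preferences appointments) := by unfold Pre_allocate_appointment; infer_instance

def pvWitness_allocate_appointment : String × List (List String) × List (List String) :=
  ("p", [["Mon", "9"]], [["Tue", "9", ""], ["Mon", "9", ""]])

def Spec_allocate_appointment (parent_name : String) (parent_preferences : List (List String)) (appointments : List (List String)) (out : Bool) : Prop := out = allocate_appointment_alt parent_name parent_preferences appointments
instance (parent_name : String) (parent_preferences : List (List String)) (appointments : List (List String)) (out : Bool) : Decidable (Spec_allocate_appointment parent_name parent_preferences appointments out) := by unfold Spec_allocate_appointment; infer_instance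

-- ===== CLAIM (what is proved, stated in full; the proofs are below) =====
def Claim_equal_allocate_appointment : Prop := ∀ (parent_name : String) (parent_preferences : List (List String)) (appointments : List (List String)), Dom_allocate_appointment parent_name parent_preferences appointments → Pre_allocate_appointment parent_name parent_preferences appointments → Spec_allocate_appointment parent_name parent_preferences appointments (allocate_appointment parent_name parent_preferences appointments)

-- ===== LEMMAS AND PROOFS =====
-- A's fallback scan answers exactly "is there an empty slot"
theorem pvA_phase2_eq (l : List (List String)) :
    pvA_phase2 l = l.any (fun a => a[2]? == some "") := by
  induction l with
  | nil => rfl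
  | cons a rest ih =>
      simp only [pvA_phase2, List.any_cons]
      split
      · next h => simp [h]
      · next h => simp [h, ih]

-- A's inner scan only succeeds if some slot is empty
theorem pvA_inner_empty (p : List String) (l : List (List String))
    (h : pvA_inner p l = true) : l.any (fun a => a[2]? == some "") = true := by
  induction l with
  | nil => simp [pvA_inner] at h
  | cons a rest ih =>
      simp only [pvA_inner] at h
      simp only [List.any_cons, Bool.or_eq_true]
      split at h
      · next hc =>
          simp only [Bool.and_eq_true, beq_iff_eq] at hc
          left; simp [hc.2]
      · right; exact ih h

theorem pvA_phase1_empty (prefs appts : List (List String))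
    (h : pvA_phase1 appts prefs = true) : appts.any (fun a => a[2]? == some "") = true := by
  induction prefs with
  | nil => simp [pvA_phase1] at h
  | cons p rest ih =>
      simp only [pvA_phase1] at h
      split at h
      · next hc => exact pvA_inner_empty p appts hc
      · exact ih h

theorem pvA_eq (pn : String) (prefs appts : List (List String)) :
    allocate_appointment pn prefs appts = appts.any (fun a => a[2]? == some "") := by
  unfold allocate_appointment
  split
  · next h => exact (pvA_phase1_empty prefs appts h).symm
  · exact pvA_phase2_eq appts

-- every value stored by pvB_build stays ≤ s when the indices inserted stay ≤ s
theorem pvB_build_bound (l : List (List String))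
    (d : PySem.Dict (Option String × Option String) Nat) (i s : Nat)
    (hd : ∀ pr ∈ d.items, pr.2 ≤ s) (hi : i + l.length ≤ s + 1) :
    ∀ pr ∈ (pvB_build d i l).items, pr.2 ≤ s := by
  induction l generalizing d i with
  | nil => simpa [pvB_build] using hd
  | cons p rest ih =>
      simp only [pvB_build]
      apply ih
      · intro pr hpr
        split at hpr
        · exact hd pr hpr
        · rcases (PySem.Dict.mem_items_insert _ _ _ _).1 hpr with h | h
          · subst h; simp only; simp at hi; omega
          · exact hd pr h.1
      · simp at hi ⊢; omega

theorem pvB_getD_le (rank : PySem.Dict (Option String × Option String) Nat) (s : Nat)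
    (hb : ∀ pr ∈ rank.items, pr.2 ≤ s) (k : Option String × Option String) :
    rank.getD k s ≤ s := by
  rw [PySem.Dict.getD_eq_get?_getD]
  cases h : rank.get? k with
  | none => simp
  | some v => simpa using hb (k, v) (PySem.Dict.mem_items_of_get?_eq_some _ h)

-- once a best slot is chosen, the loop never returns none
theorem pvB_loop_some (rank : PySem.Dict (Option String × Option String) Nat) (s : Nat)
    (l : List (List String)) (b : List String) (r : Nat) :
    (pvB_loop rank s l (some b) r).isSome = true := by
  induction l generalizing b r with
  | nil => rfl
  | cons a rest ih =>
      simp only [pvB_loop]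
      split
      · split
        · exact ih _ _
        · exact ih _ _
      · exact ih _ _

-- from the initial state, the loop finds a slot iff an empty slot exists
theorem pvB_loop_none (rank : PySem.Dict (Option String × Option String) Nat) (s : Nat)
    (hb : ∀ pr ∈ rank.items, pr.2 ≤ s) (l : List (List String)) :
    (pvB_loop rank s l none (s + 1)).isSome = l.any (fun a => a[2]? == some "") := by
  induction l with
  | nil => rfl
  | cons a rest ih =>
      simp only [pvB_loop, List.any_cons]
      split
      · next h =>
          have hr : rank.getD (a[0]?, a[1]?) s < s + 1 :=
            Nat.lt_succ_of_le (pvB_getD_le rank s hb _)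
          rw [if_pos hr]
          simp [h, pvB_loop_some]
      · next h => simp [h, ih]

theorem pvB_eq (pn : String) (prefs appts : List (List String)) :
    allocate_appointment_alt pn prefs appts = appts.any (fun a => a[2]? == some "") := by
  unfold allocate_appointment_alt
  have hb : ∀ pr ∈ (pvB_build PySem.Dict.empty 0 prefs).items, pr.2 ≤ prefs.length := by
    apply pvB_build_bound prefs PySem.Dict.empty 0 prefs.length
    · intro pr hpr; simp [PySem.Dict.empty] at hpr
    · omega
  have h := pvB_loop_none (pvB_build PySem.Dict.empty 0 prefs) prefs.length hb appts
  cases hc : pvB_loop (pvB_build PySem.Dict.empty 0 prefs) prefs.length appts none (prefs.length + 1) with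
  | none =>
      rw [hc] at h; simp only [Option.isSome_none] at h; simp [hc, ← h]
  | some b =>
      rw [hc] at h; simp only [Option.isSome_some] at h; simp [hc, ← h]

-- ===== VERDICT (by name: the statement is the Claim_ definition above) =====
theorem allocate_appointment_spec : Claim_equal_allocate_appointment := by
  intro pn prefs appts _ _
  unfold Spec_allocate_appointment
  rw [pvA_eq, pvB_eq]
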